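-- pv_equiv track=rewrite | github.com/ryanlll3/ucenter_program | ucenter_api/cmdb/CI_List.py | deep_analyze_data
-- ===== SOURCE A (Python) =====
-- def deep_analyze_data(_list):
--     # 内循环解析
--     l1 = []
--     for field_dict in _list:
--         if field_dict["key"] == "ip_address":
--             l1.append(field_dict["value"])
--     if not l1:
--         l1.append("")
--     # 内循环解析
--     l2 = []
--     for field_dict in _list:
--         if field_dict["key"] == "physical_location":
--             l2.append(field_dict["value"])
--     if not l2:
--         l2.append("")
--     # 内循环解析
--     l3 = []
--     for field_dict in _list:
--         if field_dict["key"] == "monitor_id":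
--             l3.append(field_dict["value"])
--     if not l3:
--         l3.append("")
--     # 得出以上所有内循环解析的列表
--     return l1 + l2 + l3
-- ===== SOURCE B (Python) =====
-- def deep_analyze_data(_list):
--     # One pass: dispatch each field_dict to its bucket, then pad empty buckets.
--     l1, l2, l3 = [], [], []
--     for field_dict in _list:
--         k = field_dict["key"]
--         if k == "ip_address":
--             l1.append(field_dict["value"])
--         elif k == "physical_location":
--             l2.append(field_dict["value"])
--         elif k == "monitor_id":
--             l3.append(field_dict["value"])
--     for l in (l1, l2, l3):
--         if not l:
--             l.append("")
--     return l1 + l2 + l3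
-- ===== Notes on version B (the rewrite author's own statement) =====
-- stated objective: alternative
-- what changed: Replaces A's three sequential scans of _list (one per key) by a single pass that dispatches each entry into one of three buckets, padding empty buckets afterwards.
import Mathlib
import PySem

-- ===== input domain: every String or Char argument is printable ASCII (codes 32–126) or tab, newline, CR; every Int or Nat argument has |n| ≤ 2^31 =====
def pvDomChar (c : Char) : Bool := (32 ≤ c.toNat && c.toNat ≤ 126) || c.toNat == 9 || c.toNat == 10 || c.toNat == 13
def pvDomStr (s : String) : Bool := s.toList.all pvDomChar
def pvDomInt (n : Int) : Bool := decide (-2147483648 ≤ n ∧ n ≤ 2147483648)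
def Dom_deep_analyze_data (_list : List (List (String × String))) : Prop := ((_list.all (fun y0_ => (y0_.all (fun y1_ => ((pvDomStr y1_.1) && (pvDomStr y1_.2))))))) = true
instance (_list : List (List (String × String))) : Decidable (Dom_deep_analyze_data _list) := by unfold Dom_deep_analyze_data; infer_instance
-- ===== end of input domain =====

-- B does the same collection in ONE pass dispatching on field_dict["key"] instead of A's three scans.
-- Equivalence is about the return value; neither program mutates its argument.

-- shared helpers: field_dict["key"] / field_dict["value"].  Under Pre_ the keys are present,
-- so getD with a dummy default is exact (Python raises KeyError exactly outside Pre_).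
def pvKey (d : List (String × String)) : String := (PySem.Dict.ofList d).getD "key" ""
def pvVal (d : List (String × String)) : String := (PySem.Dict.ofList d).getD "value" ""

-- ===== PORT A =====
-- A's three per-key scan steps
def pvStep1 (acc : List String) (d : List (String × String)) : List String :=
  if pvKey d == "ip_address" then acc ++ [pvVal d] else acc
def pvStep2 (acc : List String) (d : List (String × String)) : List String :=
  if pvKey d == "physical_location" then acc ++ [pvVal d] else acc
def pvStep3 (acc : List String) (d : List (String × String)) : List String :=
  if pvKey d == "monitor_id" then acc ++ [pvVal d] else acc

def deep_analyze_data (_list : List (List (String × String))) : List String :=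
  let l1 := _list.foldl pvStep1 []
  let l1 := if l1 = [] then l1 ++ [""] else l1
  let l2 := _list.foldl pvStep2 []
  let l2 := if l2 = [] then l2 ++ [""] else l2
  let l3 := _list.foldl pvStep3 []
  let l3 := if l3 = [] then l3 ++ [""] else l3
  l1 ++ l2 ++ l3

-- ===== PORT B =====
-- B's single dispatch step over the triple of buckets
def pvDispatch (t : List String × List String × List String) (d : List (String × String)) :
    List String × List String × List String :=
  let k := pvKey d
  if k == "ip_address" then (t.1 ++ [pvVal d], t.2.1, t.2.2)
  else if k == "physical_location" then (t.1, t.2.1 ++ [pvVal d], t.2.2)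
  else if k == "monitor_id" then (t.1, t.2.1, t.2.2 ++ [pvVal d])
  else t

def pvPad (l : List String) : List String := if l = [] then l ++ [""] else l

def deep_analyze_data_alt (_list : List (List (String × String))) : List String :=
  let t := _list.foldl pvDispatch ([], [], [])
  pvPad t.1 ++ pvPad t.2.1 ++ pvPad t.2.2

-- ===== PRECONDITION & SPEC =====
-- Pre_ excludes exactly the inputs where Python A raises KeyError: a field_dict without "key",
-- or one whose key is among the three collected names but has no "value".
def Pre_deep_analyze_data (_list : List (List (String × String))) : Prop :=
  ∀ d ∈ _list, ((PySem.Dict.ofList d).get? "key").isSome = true ∧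
    ((PySem.Dict.ofList d).getD "key" "" ∈ (["ip_address", "physical_location", "monitor_id"] : List String) →
      ((PySem.Dict.ofList d).get? "value").isSome = true)
instance (_list : List (List (String × String))) : Decidable (Pre_deep_analyze_data _list) := by
  unfold Pre_deep_analyze_data; infer_instance

def pvWitness_deep_analyze_data : (List (List (String × String))) :=
  [[("key", "ip_address"), ("value", "10.0.0.1")], [("key", "other")]]

def Spec_deep_analyze_data (_list : List (List (String × String))) (out : List String) : Prop := out = deep_analyze_data_alt _list
instance (_list : List (List (String × String))) (out : List String) : Decidable (Spec_deep_analyze_data _list out) := by unfold Spec_deep_analyze_data; infer_instance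

-- ===== CLAIM (what is proved, stated in full; the proofs are below) =====
def Claim_equal_deep_analyze_data : Prop := ∀ (_list : List (List (String × String))), Dom_deep_analyze_data _list → Pre_deep_analyze_data _list → Spec_deep_analyze_data _list (deep_analyze_data _list)

-- ===== LEMMAS AND PROOFS =====

-- the fused loop computes the three separate scans componentwise
lemma pvDispatch_split (l : List (List (String × String))) :
    ∀ a b c, l.foldl pvDispatch (a, b, c) =
      (l.foldl pvStep1 a, l.foldl pvStep2 b, l.foldl pvStep3 c) := by
  induction l with
  | nil => intro a b c; rfl
  | cons d t ih =>
    intro a b c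
    simp only [List.foldl_cons]
    have h : pvDispatch (a, b, c) d = (pvStep1 a d, pvStep2 b d, pvStep3 c d) := by
      simp only [pvDispatch, pvStep1, pvStep2, pvStep3]
      by_cases h1 : pvKey d = "ip_address" <;>
        by_cases h2 : pvKey d = "physical_location" <;>
        by_cases h3 : pvKey d = "monitor_id" <;> simp_all
    rw [h, ih]

-- ===== VERDICT (by name: the statement is the Claim_ definition above) =====
theorem deep_analyze_data_spec : Claim_equal_deep_analyze_data := by
  intro l _ _
  unfold Spec_deep_analyze_data deep_analyze_data deep_analyze_data_alt pvPad
  rw [pvDispatch_split]
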